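-- pv_equiv track=rewrite | github.com/ganeshprasad21/data_structures_practice | stack/replacepi.py | replacepi
-- ===== SOURCE A (Python) =====
-- def replacepi(string):
--     if (len(string)== 0 or len(string) == 1):
--         return string
--     if (string[0:2]=="pi"):
--         subAnswer = "3.14" + replacepi(string[2:])
--     else:
--         subAnswer = string[0:2] + replacepi(string[2:])
--     return subAnswer
-- ===== SOURCE B (Python) =====
-- def replacepi(string):
--     pieces = []
--     for i in range(0, len(string), 2):
--         chunk = string[i:i+2]
--         pieces.append('3.14' if chunk == 'pi' else chunk)
--     return ''.join(pieces)
-- ===== Notes on version B (the rewrite author's own statement) =====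
-- stated objective: faster
-- what changed: Replaced A's prefix+recurse recursion with a single iterative pass: loop i over range(0, len, 2), collect each 2-char chunk (replacing 'pi' with '3.14') into a list and join once, avoiding recursion and quadratic string concatenation.
import Mathlib
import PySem

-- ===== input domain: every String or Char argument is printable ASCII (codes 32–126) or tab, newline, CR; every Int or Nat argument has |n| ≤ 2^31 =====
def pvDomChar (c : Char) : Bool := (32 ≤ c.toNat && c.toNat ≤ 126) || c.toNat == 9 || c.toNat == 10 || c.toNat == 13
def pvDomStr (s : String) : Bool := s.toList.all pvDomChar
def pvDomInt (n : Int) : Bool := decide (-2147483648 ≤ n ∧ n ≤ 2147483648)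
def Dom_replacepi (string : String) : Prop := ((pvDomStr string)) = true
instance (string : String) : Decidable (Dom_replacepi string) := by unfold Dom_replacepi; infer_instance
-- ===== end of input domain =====

-- B replaces A's prefix+recurse recursion by one iterative pass over the even indices
-- collecting chunks into a list joined once (objective: faster — one pass, no recursion, no repeated concatenation).

-- ===== PORT A =====
-- A's recursion, on the character list (string[0:2] == "pi" with len ≥ 2 is exactly
-- the first-two-characters test; string[2:] is the tail after two characters).
def pvReplacepiChars : List Char → List Char
  | [] => []                -- len(string) == 0: return string
  | [c] => [c]              -- len(string) == 1: return string
  | a :: b :: rest =>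
      if [a, b] = ['p', 'i'] then ['3', '.', '1', '4'] ++ pvReplacepiChars rest
      else [a, b] ++ pvReplacepiChars rest

def replacepi (string : String) : String :=
  String.ofList (pvReplacepiChars string.toList)

-- ===== PORT B =====
-- chunk = string[i:i+2]; '3.14' if chunk == 'pi' else chunk
def pvChunk (cs : List Char) (i : Int) : List Char :=
  let chunk := PySem.List.slice cs (some i) (some (i + 2))
  if chunk = ['p', 'i'] then ['3', '.', '1', '4'] else chunk

-- for i in range(0, len(string), 2): pieces.append(...); return ''.join(pieces)
def replacepi_alt (string : String) : String :=
  String.ofList (((PySem.List.pyRange 0 (string.toList.length : Int) 2).foldl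
      (fun pieces i => pieces ++ [pvChunk string.toList i]) []).flatten)  -- ''.join over lists of characters

-- ===== PRECONDITION & SPEC =====
def Spec_replacepi (string : String) (out : String) : Prop := out = replacepi_alt string
instance (string : String) (out : String) : Decidable (Spec_replacepi string out) := by unfold Spec_replacepi; infer_instance

-- ===== CLAIM (what is proved, stated in full; the proofs are below) =====
def Claim_equal_replacepi : Prop := ∀ (string : String), Dom_replacepi string → Spec_replacepi string (replacepi string)

-- ===== LEMMAS AND PROOFS =====

-- number of chunks produced by B's range loop, in Nat form
lemma pv_pyRange_two (n : Nat) :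
    PySem.List.pyRange 0 (n : Int) 2 =
      (List.range ((n + 1) / 2)).map (fun k => ((2 * k : Nat) : Int)) := by
  rw [PySem.List.pyRange_of_pos 0 (n : Int) (by norm_num)]
  rcases Nat.eq_zero_or_pos n with h | h
  · subst h; simp
  · have hlt : (0 : Int) < (n : Int) := by exact_mod_cast h
    rw [if_pos hlt]
    have hcnt : (((n : Int) - 0 + 2 - 1) / 2).toNat = (n + 1) / 2 := by omega
    rw [hcnt]
    apply List.map_congr_left
    intro k _
    push_cast; ring

-- the chunk at index 2(k+1) of a::b::rest is the chunk at index 2k of rest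
lemma pv_chunk_shift (a b : Char) (rest : List Char) (k : Nat) :
    pvChunk (a :: b :: rest) ((2 * (k + 1) : Nat) : Int) = pvChunk rest ((2 * k : Nat) : Int) := by
  unfold pvChunk
  have h1 : ((2 * (k + 1) : Nat) : Int) + 2 = ((2 * (k + 1) + 2 : Nat) : Int) := by push_cast; ring
  have h2 : ((2 * k : Nat) : Int) + 2 = ((2 * k + 2 : Nat) : Int) := by push_cast; ring
  rw [h1, h2, PySem.List.slice_natCast, PySem.List.slice_natCast]
  have : (a :: b :: rest).drop (2 * (k + 1)) = rest.drop (2 * k) := by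
    have : 2 * (k + 1) = (2 * k + 1) + 1 := by ring
    rw [this, List.drop_succ_cons, List.drop_succ_cons]
  rw [this]
  have h3 : 2 * (k + 1) + 2 - 2 * (k + 1) = 2 * k + 2 - 2 * k := by omega
  rw [h3]

-- B's chunk list flattens to exactly A's recursion
lemma pv_main : ∀ cs : List Char,
    ((List.range ((cs.length + 1) / 2)).map
        (fun k => pvChunk cs ((2 * k : Nat) : Int))).flatten = pvReplacepiChars cs
  | [] => by simp [pvReplacepiChars]
  | [c] => by simp [pvReplacepiChars, pvChunk, PySem.List.slice]
  | a :: b :: rest => by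
      have ih := pv_main rest
      have hcnt : ((a :: b :: rest).length + 1) / 2 = (rest.length + 1) / 2 + 1 := by
        simp only [List.length_cons]; omega
      rw [hcnt, List.range_succ_eq_map]
      simp only [List.map_cons, List.map_map, List.flatten_cons]
      have htail : ((List.range ((rest.length + 1) / 2)).map
          ((fun k => pvChunk (a :: b :: rest) ((2 * k : Nat) : Int)) ∘ Nat.succ)) =
          (List.range ((rest.length + 1) / 2)).map (fun k => pvChunk rest ((2 * k : Nat) : Int)) := by
        apply List.map_congr_left
        intro k _
        simp only [Function.comp]
        exact pv_chunk_shift a b rest k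
      rw [htail, ih]
      have hsl : PySem.List.slice (a :: b :: rest) (some ((2 * 0 : Nat) : Int))
          (some (((2 * 0 : Nat) : Int) + 2)) = [a, b] := by
        rw [show (((2 * 0 : Nat) : Int) + 2) = (((2 : Nat) : Int)) by norm_num,
          show ((2 * 0 : Nat) : Int) = ((0 : Nat) : Int) by norm_num,
          PySem.List.slice_natCast]
        rfl
      have hch : pvChunk (a :: b :: rest) ((2 * 0 : Nat) : Int) =
          (if [a, b] = ['p', 'i'] then ['3', '.', '1', '4'] else [a, b]) := by
        unfold pvChunk
        rw [hsl]
      rw [hch]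
      show _ = pvReplacepiChars (a :: b :: rest)
      rw [pvReplacepiChars]
      by_cases h : [a, b] = ['p', 'i']
      · have ha : a = 'p' := by injection h
        have hb : b = 'i' := by injection h with _ h'; injection h'
        simp [ha, hb]
      · have h' : ¬ (a = 'p' ∧ b = 'i') := by
          intro ⟨ha, hb⟩; exact h (by rw [ha, hb])
        simp [h]

-- ===== VERDICT (by name: the statement is the Claim_ definition above) =====
theorem replacepi_spec : Claim_equal_replacepi := by
  intro s _
  unfold Spec_replacepi replacepi replacepi_alt
  rw [PySem.List.foldl_append_singleton_eq_map, List.nil_append,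
    pv_pyRange_two, List.map_map]
  simp only [Function.comp_def]
  rw [pv_main s.toList]
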